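-- pv_equiv track=rewrite | github.com/xieyz1980/prospector | scripts/extract_emails.py | prioritize_emails
-- ===== SOURCE A (Python) =====
-- def prioritize_emails(emails, domain):
--     if not emails:
--         return []
--
--     email_list = list(emails)
--
--     priority_prefixes = [
--         ('sales', 100),
--         ('contact', 90),
--         ('info', 80),
--         ('business', 70),
--         ('support', 60),
--         ('hello', 50),
--         ('team', 40),
--     ]
--
--     def get_score(email):
--         local = email.split('@')[0].lower()
--
--         for prefix, score in priority_prefixes:
--             if local.startswith(prefix) or local == prefix:
--                 return score
--
--         if domain and domain in email:
--             return 30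
--
--         return 0
--
--     email_list.sort(key=get_score, reverse=True)
--
--     return email_list
-- ===== SOURCE B (Python) =====
-- def prioritize_emails(emails, domain):
--     if not emails:
--         return []
--
--     # startswith(prefix) already covers local == prefix; score = 100 - 10*rank
--     prefixes = ['sales', 'contact', 'info', 'business', 'support', 'hello', 'team']
--
--     def score(email):
--         local = email.split('@')[0].lower()
--         for i, p in enumerate(prefixes):
--             if local.startswith(p):
--                 return 100 - 10 * i
--         return 30 if (domain and domain in email) else 0
--
--     # one bucket-grouping pass, emitted in descending score order (stable)
--     scores = (100, 90, 80, 70, 60, 50, 40, 30, 0)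
--     buckets = {s: [] for s in scores}
--     for e in emails:
--         buckets[score(e)].append(e)
--     out = []
--     for s in scores:
--         out += buckets[s]
--     return out
-- ===== Notes on version B (the rewrite author's own statement) =====
-- stated objective: alternative
-- what changed: Replaces A's stable comparison sort with key (reverse=True) by a single bucket-grouping pass over the fixed score set {100,90,80,70,60,50,40,30,0}, concatenating the buckets in descending score order; the scorer is also restructured (indexed prefix list with score 100-10*i, startswith subsuming the equality test). In practice the scorer dominates both, so the cost is the same.
import Mathlib
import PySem

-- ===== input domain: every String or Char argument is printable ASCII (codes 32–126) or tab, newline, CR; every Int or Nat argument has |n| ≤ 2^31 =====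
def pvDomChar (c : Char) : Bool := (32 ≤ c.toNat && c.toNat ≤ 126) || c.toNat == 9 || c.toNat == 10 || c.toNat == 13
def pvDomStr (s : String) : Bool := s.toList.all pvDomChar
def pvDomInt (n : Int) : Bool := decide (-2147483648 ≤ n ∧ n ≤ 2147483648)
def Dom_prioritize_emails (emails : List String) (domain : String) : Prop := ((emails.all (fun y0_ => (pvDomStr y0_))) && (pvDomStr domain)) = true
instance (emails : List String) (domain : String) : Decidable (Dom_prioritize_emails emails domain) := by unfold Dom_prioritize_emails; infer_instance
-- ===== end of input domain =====

-- B replaces A's stable comparison sort (sort with key, reverse=True) by a one-pass bucket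
-- grouping over the fixed score set, emitted in descending score order, with a restructured scorer (objective: alternative algorithm, same measured cost).

-- ===== PORT A =====
def priority_prefixes : List (String × Int) :=
  [("sales", 100), ("contact", 90), ("info", 80), ("business", 70),
   ("support", 60), ("hello", 50), ("team", 40)]

-- the 'for prefix, score in priority_prefixes: …' loop with its early return
def prefix_loop (lcl : String) : List (String × Int) → Option Int
  | [] => none
  | (pfx, score) :: rest =>
      if PySem.Str.startswith lcl pfx || lcl == pfx then some score else prefix_loop lcl rest

-- email.split('@') with a nonempty literal separator always returns a nonempty list,
-- so the `.getD []` / `.headD ""` defaults below are never reached (exact for `[0]`).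
def get_score (domain email : String) : Int :=
  let lcl := PySem.Str.lower (((PySem.Str.split? email "@").getD []).headD "")
  match prefix_loop lcl priority_prefixes with
  | some score => score
  | none => if domain != "" && PySem.Str.isIn domain email then 30 else 0

def prioritize_emails (emails : List String) (domain : String) : List String :=
  if emails.isEmpty then []
  else PySem.List.sorted emails (fun e => get_score domain e) true

-- ===== PORT B =====
def b_prefixes : List String := ["sales", "contact", "info", "business", "support", "hello", "team"]

-- the 'for i, p in enumerate(prefixes): …' loop with its early return (score 100 - 10*i)
def b_scan (lcl : String) (i : Int) : List String → Option Int
  | [] => none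
  | p :: rest =>
      if PySem.Str.startswith lcl p then some (100 - 10 * i) else b_scan lcl (i + 1) rest

def b_score (domain email : String) : Int :=
  let lcl := PySem.Str.lower (((PySem.Str.split? email "@").getD []).headD "")
  match b_scan lcl 0 b_prefixes with
  | some s => s
  | none => if domain != "" && PySem.Str.isIn domain email then 30 else 0

def b_scores : List Int := [100, 90, 80, 70, 60, 50, 40, 30, 0]

def prioritize_emails_alt (emails : List String) (domain : String) : List String :=
  if emails.isEmpty then []
  else
    -- buckets = {s: [] for s in scores}
    let buckets0 : PySem.Dict Int (List String) :=
      b_scores.foldl (fun d s => d.insert s []) PySem.Dict.empty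
    -- for e in emails: buckets[score(e)].append(e)   (key always pre-seeded, so the [] default is never read)
    let buckets :=
      emails.foldl (fun d e => d.modify (b_score domain e) [] (fun l => l ++ [e])) buckets0
    -- out = []; for s in scores: out += buckets[s]
    b_scores.foldl (fun acc s => acc ++ buckets.getD s []) []

-- ===== PRECONDITION & SPEC =====
def Spec_prioritize_emails (emails : List String) (domain : String) (out : List String) : Prop := out = prioritize_emails_alt emails domain
instance (emails : List String) (domain : String) (out : List String) : Decidable (Spec_prioritize_emails emails domain out) := by unfold Spec_prioritize_emails; infer_instance

-- ===== CLAIM (what is proved, stated in full; the proofs are below) =====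
def Claim_equal_prioritize_emails : Prop := ∀ (emails : List String) (domain : String), Dom_prioritize_emails emails domain → Spec_prioritize_emails emails domain (prioritize_emails emails domain)

-- ===== LEMMAS AND PROOFS =====

-- startswith subsumes equality: 'l.startswith(p) or l == p' is just 'l.startswith(p)'
lemma startswith_or_eq (l p : String) :
    (PySem.Str.startswith l p || l == p) = PySem.Str.startswith l p := by
  by_cases h : l = p
  · subst h
    have : PySem.Chars.startswith l.toList l.toList = true :=
      (PySem.Chars.startswith_iff _ _).mpr (List.prefix_refl _)
    simp [this]
  · have : (l == p) = false := by simpa using h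
    simp [this]

-- the two prefix loops agree on the fixed prefix lists
lemma loops_agree (lcl : String) :
    prefix_loop lcl priority_prefixes = b_scan lcl 0 b_prefixes := by
  simp only [priority_prefixes, b_prefixes, prefix_loop, b_scan, startswith_or_eq]
  norm_num
  try rfl

-- the two scorers coincide
lemma score_eq (domain email : String) : b_score domain email = get_score domain email := by
  unfold b_score get_score
  simp only []
  rw [loops_agree]

-- insertBy walks past a block of elements it does not go before
lemma insertBy_skip {α : Type} (before : α → α → Bool) (x : α) (B rest : List α)
    (hB : ∀ y ∈ B, before x y = false) :
    PySem.List.insertBy before x (B ++ rest) = B ++ PySem.List.insertBy before x rest := by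
  induction B with
  | nil => rfl
  | cons b B ih =>
      have hb : before x b = false := hB b (List.mem_cons_self ..)
      cases B with
      | nil =>
          cases rest with
          | nil => simp [PySem.List.insertBy, hb]
          | cons r t => simp [PySem.List.insertBy, hb]
      | cons b' B' =>
          have := ih (fun y hy => hB y (List.mem_cons_of_mem _ hy))
          simp only [List.cons_append, PySem.List.insertBy, hb] at this ⊢
          simp [this]

-- the prefix loop only ever returns a score drawn from its list
lemma prefix_loop_mem (lcl : String) (l : List (String × Int)) (s : Int)
    (h : prefix_loop lcl l = some s) : s ∈ l.map Prod.snd := by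
  induction l with
  | nil => simp [prefix_loop] at h
  | cons p rest ih =>
      obtain ⟨pfx, sc⟩ := p
      simp only [prefix_loop] at h
      split at h
      · simp at h; simp [h]
      · simpa using Or.inr (ih h)

-- every score get_score returns is in b_scores
lemma get_score_mem (domain email : String) : get_score domain email ∈ b_scores := by
  unfold get_score
  dsimp only
  cases h : prefix_loop (PySem.Str.lower (((PySem.Str.split? email "@").getD []).headD "")) priority_prefixes with
  | none => dsimp only; split <;> simp [b_scores]
  | some s =>
      dsimp only
      have := prefix_loop_mem _ _ _ h
      simp [priority_prefixes] at this
      rcases this with h'|h'|h'|h'|h'|h'|h' <;> simp [b_scores, h']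

-- inserting one element into a bucket concatenation appends it to the end of its own bucket
lemma insertBy_buckets {α : Type} (key : α → Int) (x : α) (xs : List α) :
    ∀ (vs : List Int), vs.Pairwise (· > ·) → key x ∈ vs →
    PySem.List.insertBy (fun a b => decide (key b < key a)) x
        (vs.flatMap (fun v => xs.filter (fun y => key y == v)))
      = vs.flatMap (fun v => (xs ++ [x]).filter (fun y => key y == v)) := by
  intro vs
  induction vs with
  | nil => intro _ h; simp at h
  | cons v vs ih =>
      intro hp hmem
      have hlt : ∀ w ∈ vs, w < v := by
        intro w hw; exact (List.pairwise_cons.mp hp).1 w hw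
      have hptail := (List.pairwise_cons.mp hp).2
      have hrest : ∀ y ∈ vs.flatMap (fun w => xs.filter (fun y => key y == w)), key y < v := by
        intro y hy
        simp only [List.mem_flatMap, List.mem_filter] at hy
        obtain ⟨w, hw, _, hky⟩ := hy
        have : key y = w := by simpa using hky
        rw [this]; exact hlt w hw
      have hBv : ∀ y ∈ xs.filter (fun y => key y == v), key y = v := by
        intro y hy
        have := (List.mem_filter.mp hy).2
        simpa using this
      simp only [List.flatMap_cons]
      by_cases hx : key x = v
      · -- x belongs to the head bucket: it lands at that bucket's end (stability)
        rw [insertBy_skip _ _ _ _ (by intro y hy; simp [hBv y hy, hx])]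
        have hfv : (xs ++ [x]).filter (fun y => key y == v) = xs.filter (fun y => key y == v) ++ [x] := by
          simp [List.filter_append, hx]
        have hfrest : ∀ w ∈ vs, (xs ++ [x]).filter (fun y => key y == w) = xs.filter (fun y => key y == w) := by
          intro w hw
          have : key x ≠ w := by rw [hx]; exact fun hc => absurd (hlt w hw) (by omega)
          simp [List.filter_append, this]
        have hR : vs.flatMap (fun w => (xs ++ [x]).filter (fun y => key y == w))
            = vs.flatMap (fun w => xs.filter (fun y => key y == w)) := by
          rw [List.flatMap_def, List.flatMap_def, List.map_congr_left hfrest]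
        rw [hfv, hR]
        cases hc : vs.flatMap (fun w => xs.filter (fun y => key y == w)) with
        | nil => simp [PySem.List.insertBy]
        | cons y t =>
            have hy : key y < v := hrest y (hc ▸ List.mem_cons_self ..)
            have : decide (key y < key x) = true := by rw [hx]; simpa using hy
            simp [PySem.List.insertBy, this]
      · -- x belongs to a later bucket: it skips the whole head bucket
        have hxvs : key x ∈ vs := by
          rcases List.mem_cons.mp hmem with h | h
          · exact absurd h hx
          · exact h
        have hxlt : key x < v := hlt _ hxvs
        rw [insertBy_skip _ _ _ _ (by intro y hy; simp [hBv y hy]; omega)]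
        have hfv : (xs ++ [x]).filter (fun y => key y == v) = xs.filter (fun y => key y == v) := by
          simp [List.filter_append, hx]
        rw [hfv, ih hptail hxvs]

-- A's stable descending sort equals the bucket concatenation in descending score order
lemma sorted_eq_buckets {α : Type} (key : α → Int) (vs : List Int)
    (hvs : vs.Pairwise (· > ·)) (hmem : ∀ e : α, key e ∈ vs) (xs : List α) :
    PySem.List.sorted xs key true = vs.flatMap (fun v => xs.filter (fun y => key y == v)) := by
  induction xs using List.reverseRecOn with
  | nil => simp [PySem.List.sorted]
  | append_singleton xs x ih =>
      rw [PySem.List.sorted_rev_eq_foldl_insertBy, List.foldl_append,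
          ← PySem.List.sorted_rev_eq_foldl_insertBy, ih]
      simp only [List.foldl_cons, List.foldl_nil]
      exact insertBy_buckets key x xs vs hvs (hmem x)

-- the seed dict {s: [] for s in scores} reads [] at every key
lemma getD_seed (l : List Int) (d : PySem.Dict Int (List String))
    (h : ∀ c, d.getD c [] = []) :
    ∀ c, (l.foldl (fun d s => d.insert s []) d).getD c [] = [] := by
  induction l generalizing d with
  | nil => exact h
  | cons s l ih =>
      intro c
      exact ih _ (fun c => by rw [PySem.Dict.getD_insert]; split <;> [rfl; exact h c]) c

-- ===== VERDICT (by name: the statement is the Claim_ definition above) =====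
theorem prioritize_emails_spec : Claim_equal_prioritize_emails := by
  intro emails domain _
  show _ = _
  unfold prioritize_emails prioritize_emails_alt
  split
  · rfl
  · have hB : (fun e => b_score domain e) = (fun e => get_score domain e) :=
      funext (fun e => score_eq domain e)
    simp only [hB]
    set key := fun e => get_score domain e with hkey
    have hseed : ∀ c, ((b_scores.foldl (fun d s => d.insert s []) PySem.Dict.empty) : PySem.Dict Int (List String)).getD c [] = [] :=
      getD_seed _ _ (fun c => rfl)
    have hfold : emails.foldl (fun d e => d.modify (key e) [] (fun l => l ++ [e]))
          (b_scores.foldl (fun d s => d.insert s []) PySem.Dict.empty)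
        = (emails.map (fun e => (key e, e))).foldl (fun d p => d.modify p.1 [] (fun l => l ++ [p.2]))
          (b_scores.foldl (fun d s => d.insert s []) PySem.Dict.empty) := by
      rw [List.foldl_map]
    have hget : ∀ c, (emails.foldl (fun d e => d.modify (key e) [] (fun l => l ++ [e]))
          (b_scores.foldl (fun d s => d.insert s []) PySem.Dict.empty)).getD c []
        = emails.filter (fun e => key e == c) := by
      intro c
      rw [hfold, PySem.Dict.getD_foldl_modify_append, hseed]
      simp [List.filter_map, Function.comp_def, List.map_map]
    rw [PySem.List.foldl_append_eq_flatMap, List.nil_append]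
    have hA := sorted_eq_buckets key b_scores (by decide) (fun e => get_score_mem domain e) emails
    rw [hA, List.flatMap_def, List.flatMap_def]
    congr 1
    exact (List.map_congr_left (fun s _ => (hget s).symm))
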